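-- pv_equiv track=rewrite | github.com/ZuheibAbdirahman/COMP2152_Labs | Week13/lab13_q2_starter.py | severity_summary
-- ===== SOURCE A (Python) =====
-- def severity_summary(findings):
--     severity_counts = {}
--     for finding in findings:
--         severity = finding.get("severity", "UNKNOWN")
--         severity_counts[severity] = severity_counts.get(severity, 0) + 1
--
--     priority_order = ["HIGH", "CRITICAL", "MEDIUM", "LOW"]
--     sorted_severities = []
--     for priority in priority_order:
--         if priority in severity_counts:
--             sorted_severities.append((priority, severity_counts[priority]))
--
--     for severity, count in severity_counts.items():
--         if severity not in priority_order:
--             sorted_severities.append((severity, count))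
--
--     return sorted_severities
-- ===== SOURCE B (Python) =====
-- def severity_summary(findings):
--     counts = {}
--     for finding in findings:
--         severity = finding.get("severity", "UNKNOWN")
--         counts[severity] = counts.get(severity, 0) + 1
--
--     priority_order = ["HIGH", "CRITICAL", "MEDIUM", "LOW"]
--
--     def rank(item):
--         return priority_order.index(item[0]) if item[0] in priority_order else len(priority_order)
--
--     return sorted(counts.items(), key=rank)
-- ===== Notes on version B (the rewrite author's own statement) =====
-- stated objective: idiomatic
-- what changed: Replaces A's two emission loops (a scan over priority_order plus a scan over the dict for leftovers) with a single stable sort of counts.items() keyed by priority index (unknown severities keyed last), relying on sort stability for insertion order among unknowns.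
import Mathlib
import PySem

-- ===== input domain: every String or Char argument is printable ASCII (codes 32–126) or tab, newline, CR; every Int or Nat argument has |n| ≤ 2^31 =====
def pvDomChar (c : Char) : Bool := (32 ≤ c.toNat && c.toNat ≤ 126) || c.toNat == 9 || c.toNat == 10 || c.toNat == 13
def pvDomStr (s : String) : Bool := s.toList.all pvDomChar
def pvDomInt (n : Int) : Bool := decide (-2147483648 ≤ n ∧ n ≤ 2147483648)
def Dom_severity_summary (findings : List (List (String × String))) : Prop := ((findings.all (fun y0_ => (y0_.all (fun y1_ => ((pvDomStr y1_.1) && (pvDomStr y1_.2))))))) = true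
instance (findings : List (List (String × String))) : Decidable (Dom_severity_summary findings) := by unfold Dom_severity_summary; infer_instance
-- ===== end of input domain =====

-- B keeps the counting pass but replaces A's two emission loops by ONE stable sort of
-- counts.items() keyed by priority index (unknown severities keyed last) — objective: idiomatic.

-- finding.get("severity", "UNKNOWN")  (shared: both Pythons perform this exact lookup)
def pvSevOf (finding : List (String × String)) : String :=
  (PySem.Dict.mk finding).getD "severity" "UNKNOWN"

-- ===== PORT A =====
def severity_summary (findings : List (List (String × String))) : List (String × Int) :=
  let severity_counts : PySem.Dict String Int :=
    findings.foldl (fun d finding =>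
      let severity := pvSevOf finding
      d.insert severity (d.getD severity 0 + 1)) PySem.Dict.empty
  let priority_order : List String := ["HIGH", "CRITICAL", "MEDIUM", "LOW"]
  let sorted_severities : List (String × Int) :=
    priority_order.foldl (fun acc priority =>
      if severity_counts.contains priority then
        acc ++ [(priority, severity_counts.getD priority 0)]
      else acc) []
  severity_counts.items.foldl (fun acc kv =>
    if !(priority_order.contains kv.1) then acc ++ [kv] else acc) sorted_severities

-- ===== PORT B =====
-- rank(item) = priority_order.index(item[0]) if item[0] in priority_order else len(priority_order)
def pvRank (item : String × Int) : Int :=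
  let priority_order : List String := ["HIGH", "CRITICAL", "MEDIUM", "LOW"]
  if priority_order.contains item.1 then
    (((PySem.List.index? priority_order item.1).getD 0 : Nat) : Int)
  else (priority_order.length : Int)

def severity_summary_alt (findings : List (List (String × String))) : List (String × Int) :=
  let counts : PySem.Dict String Int :=
    findings.foldl (fun d finding =>
      let severity := pvSevOf finding
      d.insert severity (d.getD severity 0 + 1)) PySem.Dict.empty
  PySem.List.sorted counts.items pvRank

-- ===== PRECONDITION & SPEC =====
def Spec_severity_summary (findings : List (List (String × String))) (out : List (String × Int)) : Prop := out = severity_summary_alt findings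
instance (findings : List (List (String × String))) (out : List (String × Int)) : Decidable (Spec_severity_summary findings out) := by unfold Spec_severity_summary; infer_instance

-- ===== CLAIM (what is proved, stated in full; the proofs are below) =====
def Claim_equal_severity_summary : Prop := ∀ (findings : List (List (String × String))), Dom_severity_summary findings → Spec_severity_summary findings (severity_summary findings)

-- ===== LEMMAS AND PROOFS =====

-- pvRank as a plain chain of string tests
lemma pvRank_eq (kv : String × Int) :
    pvRank kv = if kv.1 = "HIGH" then 0 else if kv.1 = "CRITICAL" then 1
      else if kv.1 = "MEDIUM" then 2 else if kv.1 = "LOW" then 3 else 4 := by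
  by_cases h1 : kv.1 = "HIGH" <;> by_cases h2 : kv.1 = "CRITICAL" <;>
    by_cases h3 : kv.1 = "MEDIUM" <;> by_cases h4 : kv.1 = "LOW" <;>
    simp [pvRank, PySem.List.index?, h1, h2, h3, h4] <;> decide

-- insertBy into a list split as (all keys ≤ key x) ++ (all keys > key x) lands in the middle
lemma insertBy_rank_mid (x : String × Int) (as bs : List (String × Int))
    (ha : ∀ a ∈ as, pvRank a ≤ pvRank x) (hb : ∀ b ∈ bs, pvRank x < pvRank b) :
    PySem.List.insertBy (fun a b => decide (pvRank a < pvRank b)) x (as ++ bs) = as ++ x :: bs := by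
  induction as with
  | nil =>
      cases bs with
      | nil => rfl
      | cons b bs => simp [PySem.List.insertBy, hb b (by simp)]
  | cons a as ih =>
      have hfalse : decide (pvRank x < pvRank a) = false := by
        simpa using not_lt.mpr (ha a (by simp))
      simp only [List.cons_append, PySem.List.insertBy, hfalse]
      simp only [Bool.false_eq_true, if_false, List.cons.injEq, true_and]
      exact ih (fun a' h => ha a' (by simp [h]))

-- the stable sort by pvRank is the five rank-buckets in order, each in original order
lemma sorted_rank_buckets (L : List (String × Int)) :
    PySem.List.sorted L pvRank =
      L.filter (fun kv => pvRank kv = 0) ++ L.filter (fun kv => pvRank kv = 1) ++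
      L.filter (fun kv => pvRank kv = 2) ++ L.filter (fun kv => pvRank kv = 3) ++
      L.filter (fun kv => pvRank kv = 4) := by
  induction L using List.reverseRecOn with
  | nil => rfl
  | append_singleton L x ih =>
      rw [PySem.List.sorted_eq_foldl_insertBy, List.foldl_append,
        ← PySem.List.sorted_eq_foldl_insertBy, ih]
      simp only [List.foldl_cons, List.foldl_nil, List.filter_append]
      have hm : ∀ (r : Int) (a : String × Int), a ∈ L.filter (fun kv => pvRank kv = r) → pvRank a = r := by
        intro r a h; simpa using (List.mem_filter.mp h).2
      have hx : pvRank x = 0 ∨ pvRank x = 1 ∨ pvRank x = 2 ∨ pvRank x = 3 ∨ pvRank x = 4 := by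
        rw [pvRank_eq]; split_ifs <;> simp
      rcases hx with h | h | h | h | h
      · have := insertBy_rank_mid x (L.filter (fun kv => pvRank kv = 0))
          (L.filter (fun kv => pvRank kv = 1) ++ L.filter (fun kv => pvRank kv = 2) ++
            L.filter (fun kv => pvRank kv = 3) ++ L.filter (fun kv => pvRank kv = 4))
          (fun a hma => by rw [hm 0 a hma, h])
          (fun b hmb => by
            simp only [List.append_assoc, List.mem_append] at hmb
            rcases hmb with hb | hb | hb | hb <;>
              simp [hm _ b hb, h])
        simp only [List.append_assoc] at this ⊢
        rw [this]
        simp [h]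
      · have := insertBy_rank_mid x
          (L.filter (fun kv => pvRank kv = 0) ++ L.filter (fun kv => pvRank kv = 1))
          (L.filter (fun kv => pvRank kv = 2) ++ L.filter (fun kv => pvRank kv = 3) ++
            L.filter (fun kv => pvRank kv = 4))
          (fun a hma => by
            simp only [List.mem_append] at hma
            rcases hma with ha | ha <;> simp [hm _ a ha, h])
          (fun b hmb => by
            simp only [List.append_assoc, List.mem_append] at hmb
            rcases hmb with hb | hb | hb <;> simp [hm _ b hb, h])
        simp only [List.append_assoc] at this ⊢
        rw [this]
        simp [h]
      · have := insertBy_rank_mid x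
          (L.filter (fun kv => pvRank kv = 0) ++ L.filter (fun kv => pvRank kv = 1) ++
            L.filter (fun kv => pvRank kv = 2))
          (L.filter (fun kv => pvRank kv = 3) ++ L.filter (fun kv => pvRank kv = 4))
          (fun a hma => by
            simp only [List.append_assoc, List.mem_append] at hma
            rcases hma with ha | ha | ha <;> simp [hm _ a ha, h])
          (fun b hmb => by
            simp only [List.mem_append] at hmb
            rcases hmb with hb | hb <;> simp [hm _ b hb, h])
        simp only [List.append_assoc] at this ⊢
        rw [this]
        simp [h]
      · have := insertBy_rank_mid x
          (L.filter (fun kv => pvRank kv = 0) ++ L.filter (fun kv => pvRank kv = 1) ++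
            L.filter (fun kv => pvRank kv = 2) ++ L.filter (fun kv => pvRank kv = 3))
          (L.filter (fun kv => pvRank kv = 4))
          (fun a hma => by
            simp only [List.append_assoc, List.mem_append] at hma
            rcases hma with ha | ha | ha | ha <;> simp [hm _ a ha, h])
          (fun b hmb => by simp [hm _ b hmb, h])
        simp only [List.append_assoc] at this ⊢
        rw [this]
        simp [h]
      · have := insertBy_rank_mid x
          (L.filter (fun kv => pvRank kv = 0) ++ L.filter (fun kv => pvRank kv = 1) ++
            L.filter (fun kv => pvRank kv = 2) ++ L.filter (fun kv => pvRank kv = 3) ++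
            L.filter (fun kv => pvRank kv = 4)) []
          (fun a hma => by
            simp only [List.append_assoc, List.mem_append] at hma
            rcases hma with ha | ha | ha | ha | ha <;> simp [hm _ a ha, h])
          (fun b hmb => by simp at hmb)
        simp only [List.append_nil] at this
        simp only [List.append_assoc] at this ⊢
        rw [this]
        simp [h]

-- both counting passes build the same counter
lemma pvCountFold (findings : List (List (String × String))) :
    findings.foldl (fun d finding =>
      let severity := pvSevOf finding
      d.insert severity (d.getD severity 0 + 1)) PySem.Dict.empty
      = PySem.Dict.counter (findings.map pvSevOf) := by
  rw [← PySem.Dict.foldl_insert_getD_add_one_eq_counter, List.foldl_map]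

-- filtering the counter's items on one key gives a singleton (or nothing)
lemma items_filter_key (sevs : List String) (p : String) :
    (PySem.Dict.counter sevs).items.filter (fun kv => kv.1 = p)
      = if (PySem.Dict.counter sevs).contains p
          then [(p, (PySem.Dict.counter sevs).getD p 0)] else [] := by
  rw [PySem.Dict.items_counter, List.filter_map]
  have hpred : ((fun kv : String × Int => decide (kv.1 = p)) ∘ fun k => (k, (List.count k sevs : Int)))
      = fun k => k == p := by
    funext k; by_cases h : k = p <;> simp [h]
  rw [hpred, List.filter_beq]
  by_cases hp : p ∈ PySem.Set.ofList sevs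
  · have h1 : List.count p (PySem.Set.ofList sevs : List String) = 1 :=
      List.count_eq_one_of_mem (PySem.Set.nodup_ofList sevs) hp
    have hc : (PySem.Dict.counter sevs).contains p = true := by
      rw [PySem.Dict.contains_counter]
      simpa using (PySem.Set.mem_ofList sevs p).mp hp
    rw [h1, hc]
    simp [PySem.Dict.getD_counter]
  · have h0 : List.count p (PySem.Set.ofList sevs : List String) = 0 :=
      List.count_eq_zero_of_not_mem hp
    have hc : (PySem.Dict.counter sevs).contains p = false := by
      rw [PySem.Dict.contains_counter]
      simp only [List.contains_eq_mem, decide_eq_false_iff_not]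
      exact fun hmem => hp ((PySem.Set.mem_ofList sevs p).mpr hmem)
    rw [h0, hc]
    simp

-- each rank bucket is the filter on the corresponding severity name
lemma bucket0 (L : List (String × Int)) :
    L.filter (fun kv => pvRank kv = 0) = L.filter (fun kv => kv.1 = "HIGH") := by
  apply List.filter_congr; intro a _
  rw [pvRank_eq]; split_ifs <;> simp_all
lemma bucket1 (L : List (String × Int)) :
    L.filter (fun kv => pvRank kv = 1) = L.filter (fun kv => kv.1 = "CRITICAL") := by
  apply List.filter_congr; intro a _
  rw [pvRank_eq]; split_ifs <;> simp_all
lemma bucket2 (L : List (String × Int)) :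
    L.filter (fun kv => pvRank kv = 2) = L.filter (fun kv => kv.1 = "MEDIUM") := by
  apply List.filter_congr; intro a _
  rw [pvRank_eq]; split_ifs <;> simp_all
lemma bucket3 (L : List (String × Int)) :
    L.filter (fun kv => pvRank kv = 3) = L.filter (fun kv => kv.1 = "LOW") := by
  apply List.filter_congr; intro a _
  rw [pvRank_eq]; split_ifs <;> simp_all
lemma bucket4 (L : List (String × Int)) :
    L.filter (fun kv => pvRank kv = 4)
      = L.filter (fun kv => !((["HIGH", "CRITICAL", "MEDIUM", "LOW"] : List String).contains kv.1)) := by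
  apply List.filter_congr; intro a _
  rw [pvRank_eq]; split_ifs <;> simp_all

-- ===== VERDICT (by name: the statement is the Claim_ definition above) =====
theorem severity_summary_spec : Claim_equal_severity_summary := by
  intro findings _
  unfold Spec_severity_summary severity_summary severity_summary_alt
  simp only [pvCountFold]
  rw [sorted_rank_buckets, bucket0, bucket1, bucket2, bucket3, bucket4]
  simp only [PySem.List.foldl_append_if]
  simp only [items_filter_key, List.nil_append]
  by_cases c1 : (PySem.Dict.counter (findings.map pvSevOf)).contains "HIGH" <;>
    by_cases c2 : (PySem.Dict.counter (findings.map pvSevOf)).contains "CRITICAL" <;>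
    by_cases c3 : (PySem.Dict.counter (findings.map pvSevOf)).contains "MEDIUM" <;>
    by_cases c4 : (PySem.Dict.counter (findings.map pvSevOf)).contains "LOW" <;>
    simp [c1, c2, c3, c4]
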